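-- pv_equiv track=rewrite | github.com/lhmisho/hackerrank-codesignal-problem | string-anagram.py | anagram_checker
-- ===== SOURCE A (Python) =====
-- def anagram_checker(arr1, arr2):
--     sorted_dict = {}
--     for word in  range(0, len(arr1)):
--         sorted_word = "".join(sorted(arr1[word]))
--         sorted_dict.update({sorted_word: sorted_dict.get(sorted_word, 0) + 1})
--
--     for i in range(0, len(arr2)):
--         arr2[i] = sorted_dict.get("".join(sorted(arr2[i])), 0)
--
--
--     return arr2
-- ===== SOURCE B (Python) =====
-- def anagram_checker(arr1, arr2):
--     for i in range(len(arr2)):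
--         target = "".join(sorted(arr2[i]))
--         cnt = 0
--         for w in arr1:
--             if "".join(sorted(w)) == target:
--                 cnt += 1
--         arr2[i] = cnt
--     return arr2
-- ===== Notes on version B (the rewrite author's own statement) =====
-- stated objective: alternative
-- what changed: Replaces the pre-built dict of sorted-key counts with a nested scan: for each query word in arr2 it rescans arr1 and counts anagram matches directly, mutating arr2 in place.
import Mathlib
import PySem

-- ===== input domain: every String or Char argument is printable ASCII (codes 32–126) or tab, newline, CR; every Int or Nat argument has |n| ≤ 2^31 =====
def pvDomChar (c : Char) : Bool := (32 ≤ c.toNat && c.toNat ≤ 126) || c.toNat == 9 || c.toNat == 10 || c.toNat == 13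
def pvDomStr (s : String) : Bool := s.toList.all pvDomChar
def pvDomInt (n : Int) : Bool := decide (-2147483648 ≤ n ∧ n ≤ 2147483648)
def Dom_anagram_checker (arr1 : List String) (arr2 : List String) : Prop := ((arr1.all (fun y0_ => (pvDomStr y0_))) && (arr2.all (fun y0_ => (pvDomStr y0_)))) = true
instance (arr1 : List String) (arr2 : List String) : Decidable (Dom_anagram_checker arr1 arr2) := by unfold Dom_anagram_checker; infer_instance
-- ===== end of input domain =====

-- B replaces A's pre-built sorted-key count dict with a direct nested scan of arr1 per query word
-- (same return value; both Pythons mutate arr2 in place and return it — the proof is about the return value,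
-- which here is the whole observable effect since B performs the same mutation).

-- "".join(sorted(s)) — the anagram key. Keys are compared only for equality, and "".join on chars is
-- injective, so the key is kept as the sorted List Char (exact for equality comparisons).
def sortKey (s : String) : List Char := PySem.List.sorted s.toList (fun c => c) false

-- ===== PORT A =====
-- for word in range(0, len(arr1)): sorted_dict.update({k: sorted_dict.get(k,0)+1})  (update = insert)
-- then for i in range(0, len(arr2)): arr2[i] = sorted_dict.get(k_i, 0); the in-place int assignments
-- build the returned List Int (indices of both loops are always in range, so pyGetD with default "" is exact).
def anagram_checker (arr1 : List String) (arr2 : List String) : List Int :=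
  let d : PySem.Dict (List Char) Int :=
    (PySem.List.pyRange 0 (arr1.length : Int) 1).foldl
      (fun d i =>
        d.insert (sortKey (PySem.List.pyGetD arr1 i ""))
          (d.getD (sortKey (PySem.List.pyGetD arr1 i "")) 0 + 1))
      PySem.Dict.empty
  (PySem.List.pyRange 0 (arr2.length : Int) 1).map
    (fun i => d.getD (sortKey (PySem.List.pyGetD arr2 i "")) 0)

-- ===== PORT B =====
-- for each i: scan all of arr1, counting words whose sorted form equals arr2[i]'s; assign the count.
def anagram_checker_alt (arr1 : List String) (arr2 : List String) : List Int :=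
  arr2.map (fun w =>
    arr1.foldl (fun cnt x => if sortKey x = sortKey w then cnt + 1 else cnt) (0 : Int))

-- ===== PRECONDITION & SPEC =====
def Spec_anagram_checker (arr1 : List String) (arr2 : List String) (out : List Int) : Prop := out = anagram_checker_alt arr1 arr2
instance (arr1 : List String) (arr2 : List String) (out : List Int) : Decidable (Spec_anagram_checker arr1 arr2 out) := by unfold Spec_anagram_checker; infer_instance

-- ===== CLAIM (what is proved, stated in full; the proofs are below) =====
def Claim_equal_anagram_checker : Prop := ∀ (arr1 : List String) (arr2 : List String), Dom_anagram_checker arr1 arr2 → Spec_anagram_checker arr1 arr2 (anagram_checker arr1 arr2)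

-- ===== LEMMAS AND PROOFS =====

-- A's dict is Counter(sortKey(w) for w in arr1).
lemma dict_eq_counter (arr1 : List String) :
    (PySem.List.pyRange 0 (arr1.length : Int) 1).foldl
      (fun (d : PySem.Dict (List Char) Int) i =>
        d.insert (sortKey (PySem.List.pyGetD arr1 i ""))
          (d.getD (sortKey (PySem.List.pyGetD arr1 i "")) 0 + 1))
      PySem.Dict.empty
    = PySem.Dict.counter (arr1.map sortKey) := by
  have h := PySem.List.foldl_pyRange_zero_pyGetD' arr1 ""
      (fun (d : PySem.Dict (List Char) Int) w =>
        d.insert (sortKey w) (d.getD (sortKey w) 0 + 1)) PySem.Dict.empty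
  simp only at h
  rw [h]
  rw [← List.foldl_map (f := sortKey)
      (g := fun (d : PySem.Dict (List Char) Int) k => d.insert k (d.getD k 0 + 1))]
  exact PySem.Dict.foldl_insert_getD_add_one_eq_counter (arr1.map sortKey)

-- B's inner scan is the same count.
lemma foldl_count (arr1 : List String) (w : String) :
    arr1.foldl (fun cnt x => if sortKey x = sortKey w then cnt + 1 else cnt) (0 : Int)
    = ((arr1.map sortKey).count (sortKey w) : Int) := by
  induction arr1 using List.reverseRecOn with
  | nil => simp
  | append_singleton xs x ih =>
      simp [List.foldl_append, ih, List.count_append]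
      by_cases h : sortKey x = sortKey w
      · simp [h]
      · simp [h]

-- ===== VERDICT (by name: the statement is the Claim_ definition above) =====
theorem anagram_checker_spec : Claim_equal_anagram_checker := by
  intro arr1 arr2 _
  unfold Spec_anagram_checker anagram_checker anagram_checker_alt
  rw [dict_eq_counter]
  have : (PySem.List.pyRange 0 (arr2.length : Int) 1).map
      (fun i => (PySem.Dict.counter (arr1.map sortKey)).getD
        (sortKey (PySem.List.pyGetD arr2 i "")) 0)
      = arr2.map (fun w => (PySem.Dict.counter (arr1.map sortKey)).getD (sortKey w) 0) := by
    have h := PySem.List.map_pyGetD_pyRange_zero' arr2 ""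
    conv_rhs => rw [← h]
    rw [List.map_map]
    rfl
  rw [this]
  apply List.map_congr_left
  intro w _
  rw [PySem.Dict.getD_counter, foldl_count]
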